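-- pv_equiv track=rewrite | github.com/Dalvikk/ITMOUniversity | DiscreteMath/lab01/B.py | zhegalkin
-- ===== SOURCE A (Python) =====
-- def zhegalkin(cnt, res):
--     triangle = [0] * len(res)
--     triangle[0] = res
--     for i in range(1, len(res)):
--         size = len(res) - i;
--         triangle[i] = [0] * size;
--         for j in range(size):
--             triangle[i][j] = triangle[i - 1][j] ^ triangle[i - 1][j + 1]
--
--     for i in range(len(res)):
--         if format(i, 'b').count('1') > 1 and triangle[i][0] == 1:
--             return 1
--     return 0
-- ===== SOURCE B (Python) =====
-- def zhegalkin(cnt, res):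
--     n = len(res)
--     a = res
--     b = 1
--     while b < n:
--         a = [a[i] ^ a[i ^ b] if i & b else a[i] for i in range(n)]
--         b <<= 1
--     for i in range(n):
--         if format(i, 'b').count('1') > 1 and a[i] == 1:
--             return 1
--     return 0
-- ===== Notes on version B (the rewrite author's own statement) =====
-- stated objective: faster
-- what changed: Replaces the O(n^2) Pascal-style XOR difference triangle with the in-array fast subset-sum (Moebius/SOS) transform over log2(n) passes to obtain the same ANF coefficients, then the same popcount>1 scan.
import Mathlib
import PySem

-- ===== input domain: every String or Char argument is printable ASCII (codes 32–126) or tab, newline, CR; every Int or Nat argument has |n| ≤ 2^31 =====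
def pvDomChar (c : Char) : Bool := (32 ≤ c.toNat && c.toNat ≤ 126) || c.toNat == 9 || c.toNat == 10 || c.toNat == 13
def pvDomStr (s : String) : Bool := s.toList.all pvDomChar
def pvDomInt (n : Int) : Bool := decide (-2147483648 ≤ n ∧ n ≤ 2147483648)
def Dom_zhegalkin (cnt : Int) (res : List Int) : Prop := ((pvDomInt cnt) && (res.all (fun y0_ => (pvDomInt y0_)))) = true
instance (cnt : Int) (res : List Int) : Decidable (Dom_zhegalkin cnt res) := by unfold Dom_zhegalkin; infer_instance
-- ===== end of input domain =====

-- B replaces A's quadratic XOR difference triangle by the fast subset (Möbius/SOS) transform,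
-- which computes the same ANF coefficients, followed by the same popcount scan.

-- ===== PORT A =====

-- format(i,'b').count('1')  (shared helper: both Pythons use this very expression)
def pvPop (i : Nat) : Nat := PySem.Chars.count (PySem.Int.toBinChars (i : Int)) ['1']

-- inner loop 'for j in range(size): triangle[i][j] = triangle[i-1][j] ^ triangle[i-1][j+1]'
def diffRow : List Int → List Int
  | a :: b :: t => PySem.Int.bxor a b :: diffRow (b :: t)
  | _ => []

-- outer loop 'for i in range(1, len(res)): triangle[i] = …', carrying the previous row
def buildRows : Nat → List Int → List (List Int)
  | 0, _ => []
  | m + 1, prev => prev :: buildRows m (diffRow prev)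

def zhegalkin (cnt : Int) (res : List Int) : Int :=
  let n := res.length
  if n = 0 then 0   -- Python raises IndexError at 'triangle[0] = res' on empty res; excluded by Pre_
  else
    let rows := buildRows n res
    -- 'for i in range(len(res)): if format(i,"b").count("1") > 1 and triangle[i][0] == 1: return 1 / return 0'
    if (List.range n).any (fun i => decide (1 < pvPop i) && ((rows.getD i []).getD 0 0 == 1)) then 1 else 0

-- ===== PORT B =====

-- one pass 'a = [a[i] ^ a[i ^ b] if i & b else a[i] for i in range(n)]' (all indices in range)
def sosPass (a : List Int) (b : Nat) : List Int :=
  (List.range a.length).map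
    (fun i => if i &&& b ≠ 0 then PySem.Int.bxor (a.getD i 0) (a.getD (i ^^^ b) 0) else a.getD i 0)

-- 'b = 1; while b < n: …; b <<= 1' — b is carried as its exponent m (b = 2^m), which also measures termination
def sosLoop (a : List Int) (n m : Nat) : List Int :=
  if 2 ^ m < n then sosLoop (sosPass a (2 ^ m)) n (m + 1) else a
termination_by n - 2 ^ m
decreasing_by
  have : 2 ^ m < 2 ^ (m + 1) := Nat.pow_lt_pow_succ (by omega)
  omega

def zhegalkin_alt (cnt : Int) (res : List Int) : Int :=
  let n := res.length
  let a := sosLoop res n 0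
  if (List.range n).any (fun i => decide (1 < pvPop i) && (a.getD i 0 == 1)) then 1 else 0

-- ===== PRECONDITION & SPEC =====
-- Pre_ excludes only the empty list, on which Python A raises IndexError ('triangle[0] = res').
def Pre_zhegalkin (cnt : Int) (res : List Int) : Prop := res ≠ []
instance (cnt : Int) (res : List Int) : Decidable (Pre_zhegalkin cnt res) := by unfold Pre_zhegalkin; infer_instance

def pvWitness_zhegalkin : Int × List Int := (2, [0, 1, 1, 0])

def Spec_zhegalkin (cnt : Int) (res : List Int) (out : Int) : Prop := out = zhegalkin_alt cnt res
instance (cnt : Int) (res : List Int) (out : Int) : Decidable (Spec_zhegalkin cnt res out) := by unfold Spec_zhegalkin; infer_instance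

-- ===== CLAIM (what is proved, stated in full; the proofs are below) =====
def Claim_equal_zhegalkin : Prop := ∀ (cnt : Int) (res : List Int), Dom_zhegalkin cnt res → Pre_zhegalkin cnt res → Spec_zhegalkin cnt res (zhegalkin cnt res)

-- ===== LEMMAS AND PROOFS =====

-- ---- PySem.Int.bxor on the two constructor shapes, and its group laws ----
theorem bxor_ofNat_ofNat (a b : Nat) :
    PySem.Int.bxor (Int.ofNat a) (Int.ofNat b) = Int.ofNat (a ^^^ b) := by
  simpa using PySem.Int.bxor_natCast a b

theorem bxor_ofNat_negSucc (a b : Nat) :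
    PySem.Int.bxor (Int.ofNat a) (Int.negSucc b) = Int.negSucc (a ^^^ b) := by
  simp [PySem.Int.bxor, Int.negSucc_eq]
  rw [if_neg (by omega)]
  ring

theorem bxor_negSucc_ofNat (a b : Nat) :
    PySem.Int.bxor (Int.negSucc a) (Int.ofNat b) = Int.negSucc (a ^^^ b) := by
  simp [PySem.Int.bxor, Int.negSucc_eq]
  rw [if_neg (by omega)]
  omega

theorem bxor_negSucc_negSucc (a b : Nat) :
    PySem.Int.bxor (Int.negSucc a) (Int.negSucc b) = Int.ofNat (a ^^^ b) := by
  simp [PySem.Int.bxor, Int.negSucc_eq]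
  rw [if_neg (by omega), if_neg (by omega)]

theorem bxor_assoc (a b c : Int) :
    PySem.Int.bxor (PySem.Int.bxor a b) c = PySem.Int.bxor a (PySem.Int.bxor b c) := by
  cases a <;> cases b <;> cases c <;>
    simp only [bxor_ofNat_ofNat, bxor_ofNat_negSucc, bxor_negSucc_ofNat, bxor_negSucc_negSucc,
      Nat.xor_assoc]

theorem bxor_zero_left (a : Int) : PySem.Int.bxor 0 a = a := by
  rw [PySem.Int.bxor_comm]; exact PySem.Int.bxor_zero a

theorem bxor_cancel_mid (a b c : Int) :
    PySem.Int.bxor (PySem.Int.bxor a b) (PySem.Int.bxor b c) = PySem.Int.bxor a c := by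
  rw [bxor_assoc, ← bxor_assoc b b c, PySem.Int.bxor_self, bxor_zero_left]

-- ---- xorL: XOR of f over a list of indices ----
def xorL (l : List Nat) (f : Nat → Int) : Int := l.foldr (fun k a => PySem.Int.bxor (f k) a) 0

theorem xorL_append (l₁ l₂ : List Nat) (f : Nat → Int) :
    xorL (l₁ ++ l₂) f = PySem.Int.bxor (xorL l₁ f) (xorL l₂ f) := by
  induction l₁ with
  | nil => simp [xorL, bxor_zero_left]
  | cons k t ih => simp only [xorL, List.cons_append, List.foldr_cons] at *; rw [ih, bxor_assoc]

theorem xorL_map (l : List Nat) (g : Nat → Nat) (f : Nat → Int) :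
    xorL (l.map g) f = xorL l (fun k => f (g k)) := by
  induction l with
  | nil => rfl
  | cons k t ih => simp only [xorL, List.map_cons, List.foldr_cons] at *; rw [ih]

-- ---- subL i: the submasks of i in increasing order, and the split at i's top bit ----
def subL (i : Nat) : List Nat := (List.range (i + 1)).filter (fun k => k &&& i == k)

theorem and_low (b r k : Nat) (hr : r < 2 ^ b) (hk : k < 2 ^ b) :
    k &&& (2 ^ b + r) = k &&& r := by
  have h : 2 ^ b + r = 2 ^ b ||| r := by
    simpa using Nat.two_pow_add_eq_or_of_lt hr 1
  rw [h]
  apply Nat.eq_of_testBit_eq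
  intro j
  by_cases hj : j = b
  · subst hj
    simp [Nat.testBit_and, Nat.testBit_or, Nat.testBit_eq_false_of_lt hk]
  · simp [Nat.testBit_and, Nat.testBit_or, Nat.testBit_two_pow, Ne.symm hj]

theorem and_high (b r k : Nat) (hr : r < 2 ^ b) (hk : k < 2 ^ b) :
    (2 ^ b + k) &&& (2 ^ b + r) = 2 ^ b + (k &&& r) := by
  have h1 : 2 ^ b + r = 2 ^ b ||| r := by simpa using Nat.two_pow_add_eq_or_of_lt hr 1
  have h2 : 2 ^ b + k = 2 ^ b ||| k := by simpa using Nat.two_pow_add_eq_or_of_lt hk 1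
  have h3 : 2 ^ b + (k &&& r) = 2 ^ b ||| (k &&& r) := by
    simpa using Nat.two_pow_add_eq_or_of_lt (Nat.lt_of_le_of_lt Nat.and_le_left hk) 1
  rw [h1, h2, h3]
  apply Nat.eq_of_testBit_eq
  intro j
  by_cases hj : j = b
  · subst hj; simp [Nat.testBit_and, Nat.testBit_or]
  · simp [Nat.testBit_and, Nat.testBit_or, Nat.testBit_two_pow, Ne.symm hj]

theorem subL_split (b r : Nat) (hr : r < 2 ^ b) :
    subL (2 ^ b + r) = subL r ++ (subL r).map (fun k => 2 ^ b + k) := by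
  have hrange : List.range (2 ^ b + r + 1)
      = List.range (2 ^ b) ++ (List.range (r + 1)).map (fun k => 2 ^ b + k) := by
    rw [show 2 ^ b + r + 1 = 2 ^ b + (r + 1) by omega, List.range_add]
  unfold subL
  rw [hrange, List.filter_append, List.filter_map]
  congr 1
  · -- low half: exactly the submasks of r
    have step1 : (List.range (2 ^ b)).filter (fun k => k &&& (2 ^ b + r) == k)
        = (List.range (2 ^ b)).filter (fun k => k &&& r == k) := by
      apply List.filter_congr
      intro k hk
      rw [List.mem_range] at hk
      rw [and_low b r k hr hk]
    rw [step1]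
    have hsplit : List.range (2 ^ b)
        = List.range (r + 1) ++ (List.range (2 ^ b - (r + 1))).map (fun k => (r + 1) + k) := by
      rw [← List.range_add]; congr 1; omega
    rw [hsplit, List.filter_append]
    have : ((List.range (2 ^ b - (r + 1))).map (fun k => (r + 1) + k)).filter
        (fun k => k &&& r == k) = [] := by
      rw [List.filter_eq_nil_iff]
      intro x hx
      rcases List.mem_map.mp hx with ⟨m, _, rfl⟩
      simp only [beq_iff_eq]
      intro hcon
      have : r + 1 + m ≤ r := by rw [← hcon]; exact Nat.and_le_right
      omega
    rw [this, List.append_nil]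
  · -- high half: 2^b plus each submask of r
    congr 1
    apply List.filter_congr
    intro k hk
    rw [List.mem_range] at hk
    have hk' : k < 2 ^ b := by omega
    simp only [Function.comp_apply]
    rw [and_high b r k hr hk']
    simp

-- ---- A-side: entries of iterated difference rows are subset XORs ----
theorem length_diffRow (x : List Int) : (diffRow x).length = x.length - 1 := by
  induction x with
  | nil => rfl
  | cons a t ih =>
    cases t with
    | nil => rfl
    | cons b u => simp only [diffRow, List.length_cons] at *; omega

theorem length_iter_diffRow (m : Nat) (x : List Int) :
    (diffRow^[m] x).length = x.length - m := by
  induction m generalizing x with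
  | zero => simp
  | succ k ih =>
    rw [Function.iterate_succ_apply, ih, length_diffRow]
    omega

theorem diffRow_getD (x : List Int) (j : Nat) (h : j + 1 < x.length) :
    (diffRow x).getD j 0 = PySem.Int.bxor (x.getD j 0) (x.getD (j + 1) 0) := by
  induction x generalizing j with
  | nil => simp at h
  | cons a t ih =>
    cases t with
    | nil => simp at h
    | cons b u =>
      cases j with
      | zero => rfl
      | succ k =>
        simp only [diffRow, List.getD_cons_succ]
        exact ih k (by simpa using h)

theorem iter_pow2_getD (b : Nat) (y : List Int) (j : Nat) (h : j + 2 ^ b < y.length) :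
    (diffRow^[2 ^ b] y).getD j 0 = PySem.Int.bxor (y.getD j 0) (y.getD (j + 2 ^ b) 0) := by
  induction b generalizing y j with
  | zero => simpa using diffRow_getD y j (by simpa using h)
  | succ k ih =>
    have hsum : 2 ^ (k + 1) = 2 ^ k + 2 ^ k := by rw [pow_succ]; omega
    have hc : 0 < 2 ^ k := Nat.two_pow_pos k
    rw [hsum] at h ⊢
    rw [Function.iterate_add_apply]
    have hlen : j + 2 ^ k < (diffRow^[2 ^ k] y).length := by
      rw [length_iter_diffRow]; omega
    rw [ih (diffRow^[2 ^ k] y) j hlen,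
        ih y j (by omega), ih y (j + 2 ^ k) (by omega), ← Nat.add_assoc]
    exact bxor_cancel_mid _ _ _

theorem diffHead : ∀ (i : Nat), ∀ (x : List Int) (j : Nat), j + i < x.length →
    (diffRow^[i] x).getD j 0 = xorL (subL i) (fun k => x.getD (j + k) 0) := by
  intro i
  induction i using Nat.strong_induction_on with
  | _ i ih =>
    intro x j h
    by_cases hi : i = 0
    · subst hi
      have : subL 0 = [0] := by decide
      simp [this, xorL, PySem.Int.bxor_zero]
    · have hb1 : 2 ^ i.log2 ≤ i := Nat.log2_self_le hi
      have hb2 : i < 2 ^ (i.log2 + 1) := Nat.lt_log2_self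
      have hpow : 2 ^ (i.log2 + 1) = 2 ^ i.log2 + 2 ^ i.log2 := by rw [pow_succ]; omega
      set r := i - 2 ^ i.log2 with hrdef
      have hrlt : r < 2 ^ i.log2 := by omega
      have hi_eq : i = 2 ^ i.log2 + r := by omega
      rw [hi_eq] at h ⊢
      rw [Function.iterate_add_apply]
      have hlen : j + 2 ^ i.log2 < (diffRow^[r] x).length := by
        rw [length_iter_diffRow]; omega
      rw [iter_pow2_getD _ _ _ hlen]
      have hr_lt_i : r < i := by omega
      rw [ih r (by omega) x j (by omega), ih r (by omega) x (j + 2 ^ i.log2) (by omega)]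
      rw [subL_split _ _ hrlt, xorL_append, xorL_map]
      have harg : (fun k => x.getD (j + (2 ^ i.log2 + k)) 0)
          = fun k => x.getD (j + 2 ^ i.log2 + k) 0 := by
        funext k; congr 1; omega
      rw [harg]

theorem buildRows_getD (n i : Nat) (x : List Int) (h : i < n) :
    (buildRows n x).getD i [] = diffRow^[i] x := by
  induction n generalizing i x with
  | zero => omega
  | succ m ih =>
    cases i with
    | zero => rfl
    | succ k =>
      simp only [buildRows, List.getD_cons_succ]
      rw [ih k (diffRow x) (by omega), ← Function.iterate_succ_apply]

-- ---- B-side: the SOS loop computes the same subset XORs ----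
theorem length_sosPass (a : List Int) (b : Nat) : (sosPass a b).length = a.length := by
  simp [sosPass]

theorem xor_low_high (q lo m : Nat) (hlo : lo < 2 ^ m) :
    (2 ^ (m + 1) * q + (2 ^ m + lo)) ^^^ 2 ^ m = 2 ^ (m + 1) * q + lo := by
  have hs : 2 ^ m + lo < 2 ^ (m + 1) := by rw [pow_succ]; omega
  have h1 : 2 ^ (m + 1) * q + (2 ^ m + lo) = 2 ^ (m + 1) * q ||| (2 ^ m + lo) :=
    Nat.two_pow_add_eq_or_of_lt hs q
  have h2 : 2 ^ (m + 1) * q + lo = 2 ^ (m + 1) * q ||| lo :=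
    Nat.two_pow_add_eq_or_of_lt (by omega) q
  have h3 : 2 ^ m + lo = 2 ^ m ||| lo := by simpa using Nat.two_pow_add_eq_or_of_lt hlo 1
  rw [h1, h2, h3]
  apply Nat.eq_of_testBit_eq
  intro j
  by_cases hj : j = m
  · subst hj
    simp [Nat.testBit_or, Nat.testBit_xor, Nat.testBit_two_pow_mul,
      Nat.testBit_eq_false_of_lt hlo]
  · simp [Nat.testBit_or, Nat.testBit_xor, Nat.testBit_two_pow, Ne.symm hj]

theorem sosLoop_spec (res : List Int) (n : Nat) : ∀ (fuel m : Nat), n - 2 ^ m = fuel →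
    ∀ (a : List Int), a.length = n →
    (∀ i, i < n → a.getD i 0 =
      xorL (subL (i % 2 ^ m)) (fun k => res.getD (i - i % 2 ^ m + k) 0)) →
    ∀ i, i < n → (sosLoop a n m).getD i 0 = xorL (subL i) (fun k => res.getD k 0) := by
  intro fuel
  induction fuel using Nat.strong_induction_on with
  | _ fuel ih =>
    intro m hfuel a hlen hinv i hi
    rw [sosLoop]
    by_cases hlt : 2 ^ m < n
    · rw [if_pos hlt]
      have hmono : 2 ^ m < 2 ^ (m + 1) := Nat.pow_lt_pow_succ (by omega)
      apply ih (n - 2 ^ (m + 1)) (by omega) (m + 1) rfl (sosPass a (2 ^ m))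
        (by rw [length_sosPass, hlen]) _ i hi
      -- the invariant survives one pass
      intro t ht
      have hval : (sosPass a (2 ^ m)).getD t 0 =
          if t &&& 2 ^ m ≠ 0 then PySem.Int.bxor (a.getD t 0) (a.getD (t ^^^ 2 ^ m) 0)
          else a.getD t 0 := by
        unfold sosPass
        rw [hlen, PySem.List.getD_map_range _ n t _ ht]
      have hand : t &&& 2 ^ m = t / 2 ^ m % 2 * 2 ^ m := by
        rw [Nat.and_two_pow, Nat.toNat_testBit]
      have hmp : t % 2 ^ (m + 1) = t % 2 ^ m + 2 ^ m * (t / 2 ^ m % 2) := Nat.mod_pow_succ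
      have hlo : t % 2 ^ m < 2 ^ m := Nat.mod_lt _ (Nat.two_pow_pos m)
      by_cases hbit : t &&& 2 ^ m = 0
      · -- bit m of t is clear: the entry and its invariant are unchanged
        rw [hval, if_neg (by simpa using hbit)]
        have hb0 : t / 2 ^ m % 2 = 0 := by
          rcases Nat.mod_two_eq_zero_or_one (t / 2 ^ m) with h0 | h1
          · exact h0
          · exfalso; rw [hand, h1] at hbit; omega
        rw [hinv t ht, hmp, hb0]
        simp
      · -- bit m of t is set: two invariant instances combine via subL_split
        rw [hval, if_pos (by simpa using hbit)]
        have hb1 : t / 2 ^ m % 2 = 1 := by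
          rcases Nat.mod_two_eq_zero_or_one (t / 2 ^ m) with h0 | h1
          · exfalso; rw [hand, h0] at hbit; omega
          · exact h1
        set lo := t % 2 ^ m with hlodef
        have hsmod : t % 2 ^ (m + 1) = 2 ^ m + lo := by rw [hmp, hb1]; omega
        have hdecomp : t = 2 ^ (m + 1) * (t / 2 ^ (m + 1)) + (2 ^ m + lo) := by
          have := Nat.div_add_mod t (2 ^ (m + 1))
          omega
        set q := t / 2 ^ (m + 1) with hqdef
        have hxor : t ^^^ 2 ^ m = 2 ^ (m + 1) * q + lo := by
          conv_lhs => rw [hdecomp]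
          exact xor_low_high q lo m hlo
        have hq2 : 2 ^ (m + 1) * q = 2 ^ m * (2 * q) := by rw [pow_succ]; ring
        have ht' : t ^^^ 2 ^ m < n := by
          rw [hxor]; omega
        have hmod' : (2 ^ (m + 1) * q + lo) % 2 ^ m = lo := by
          rw [hq2, Nat.mul_add_mod, Nat.mod_eq_of_lt hlo]
        -- invariant at t and at t ^^^ 2^m
        rw [hinv t ht, hinv (t ^^^ 2 ^ m) ht', hxor, hmod']
        have hmodt : t % 2 ^ m = lo := rfl
        have hsubt : t - t % 2 ^ m = 2 ^ (m + 1) * q + 2 ^ m := by omega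
        have hsub' : 2 ^ (m + 1) * q + lo - lo = 2 ^ (m + 1) * q := by omega
        have hsubs : t - (2 ^ m + lo) = 2 ^ (m + 1) * q := by omega
        rw [hmodt, hsubt, hsub', hsmod, hsubs]
        rw [subL_split _ _ hlo, xorL_append, xorL_map]
        have harg : (fun k => res.getD (2 ^ (m + 1) * q + (2 ^ m + k)) 0)
            = fun k => res.getD (2 ^ (m + 1) * q + 2 ^ m + k) 0 := by
          funext k; congr 1; omega
        rw [harg, PySem.Int.bxor_comm]
    · -- loop finished: i < n ≤ 2^m, the invariant already is the claim
      rw [if_neg hlt]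
      have : i % 2 ^ m = i := Nat.mod_eq_of_lt (by omega)
      rw [hinv i hi, this]
      simp

-- ---- the per-coefficient conditions of the two scans agree ----
theorem any_congr_mem {α : Type} (l : List α) (p q : α → Bool)
    (h : ∀ x ∈ l, p x = q x) : l.any p = l.any q := by
  induction l with
  | nil => rfl
  | cons a t ih =>
    simp only [List.any_cons]
    rw [h a (by simp), ih (fun x hx => h x (by simp [hx]))]

theorem coeff_eq (res : List Int) (i : Nat) (hi : i < res.length) :
    ((buildRows res.length res).getD i []).getD 0 0 = (sosLoop res res.length 0).getD i 0 := by
  rw [buildRows_getD _ _ _ hi, diffHead i res 0 (by omega)]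
  rw [sosLoop_spec res res.length (res.length - 2 ^ 0) 0 rfl res rfl _ i hi]
  · simp
  · intro t ht
    have h1 : subL (t % 2 ^ 0) = [0] := by norm_num [Nat.mod_one]; decide
    rw [h1]
    simp [xorL, PySem.Int.bxor_zero, Nat.mod_one]

-- ===== VERDICT (by name: the statement is the Claim_ definition above) =====
theorem zhegalkin_spec : Claim_equal_zhegalkin := by
  intro cnt res _ hpre
  unfold Spec_zhegalkin zhegalkin zhegalkin_alt
  have hne : res.length ≠ 0 := by
    intro h
    exact hpre (List.eq_nil_of_length_eq_zero h)
  rw [if_neg hne]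
  have hany : ((List.range res.length).any
        fun i => decide (1 < pvPop i) && (((buildRows res.length res).getD i []).getD 0 0 == 1))
      = ((List.range res.length).any
        fun i => decide (1 < pvPop i) && ((sosLoop res res.length 0).getD i 0 == 1)) := by
    apply any_congr_mem
    intro i hi
    rw [List.mem_range] at hi
    rw [coeff_eq res i hi]
  simp only []
  rw [hany]
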